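-- pv_equiv track=rewrite | github.com/pvmm/GW-BASIC | conv/z80conv/parser.py | _valid_number_for_radix
-- ===== SOURCE A (Python) =====
-- def _valid_number_for_radix(num, radix):
--     if radix == 8:
--         return all('0' <= c <= '7' for c in num)
--     if radix == 10:
--         return all('0' <= c <= '9' for c in num)
--     if radix == 16:
--         hex_digits = "0123456789abcdefABCDEF"
--         return all(c in hex_digits for c in num)
--     raise SyntaxError("Unknown radix: %d" % radix)
-- ===== SOURCE B (Python) =====
-- # B: arithmetic rewrite -- compute each character's numeric digit value from its
-- # char code (0-9 -> 0..9, a-f/A-F -> 10..15, else 99) and accept iff every value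
-- # is < radix; one uniform early-exit loop replaces the per-radix character classes.
-- def _digit_value(c):
--     o = ord(c)
--     if 48 <= o <= 57:
--         return o - 48
--     if 97 <= o <= 102:
--         return o - 87
--     if 65 <= o <= 70:
--         return o - 55
--     return 99
--
--
-- def _valid_number_for_radix(num, radix):
--     if radix != 8 and radix != 10 and radix != 16:
--         raise SyntaxError("Unknown radix: %d" % radix)
--     for c in num:
--         if _digit_value(c) >= radix:
--             return False
--     return True
-- ===== Notes on version B (the rewrite author's own statement) =====
-- stated objective: alternative
-- what changed: Replaces per-radix character-class membership tests (three all() loops over range/containment checks) by an arithmetic digit-value function on char codes checked against the radix in one uniform early-exit loop.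
import Mathlib
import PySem

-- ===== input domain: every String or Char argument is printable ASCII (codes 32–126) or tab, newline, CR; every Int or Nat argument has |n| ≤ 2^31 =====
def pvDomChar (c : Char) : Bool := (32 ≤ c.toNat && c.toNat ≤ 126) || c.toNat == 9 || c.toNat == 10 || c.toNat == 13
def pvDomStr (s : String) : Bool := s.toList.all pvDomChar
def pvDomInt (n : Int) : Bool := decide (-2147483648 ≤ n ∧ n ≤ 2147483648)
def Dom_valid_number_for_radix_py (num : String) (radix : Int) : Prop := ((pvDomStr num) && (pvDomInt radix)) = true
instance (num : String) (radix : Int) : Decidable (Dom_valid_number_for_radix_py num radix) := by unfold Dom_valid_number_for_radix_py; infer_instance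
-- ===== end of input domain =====

-- B replaces A's per-radix character-class all() loops by an arithmetic digit-value
-- function checked against the radix in one uniform early-exit loop; equivalence proved
-- on radix ∈ {8,10,16} (elsewhere A raises SyntaxError, excluded by Pre_).


-- ===== PORT A =====
def valid_number_for_radix_py (num : String) (radix : Int) : Bool :=
  if radix = 8 then num.toList.all (fun c => decide ('0' ≤ c ∧ c ≤ '7'))
  else if radix = 10 then num.toList.all (fun c => decide ('0' ≤ c ∧ c ≤ '9'))
  else if radix = 16 then
    -- "0123456789abcdefABCDEF"; 'c in hex_digits' is PySem.Chars.isIn (exact)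
    let hex_digits : List Char :=
      ['0','1','2','3','4','5','6','7','8','9','a','b','c','d','e','f','A','B','C','D','E','F']
    num.toList.all (fun c => PySem.Chars.isIn [c] hex_digits)
  else false  -- raise SyntaxError("Unknown radix: %d" % radix): excluded by Pre_

-- ===== PORT B =====
-- B's helper _digit_value: arithmetic on the character code
def pvDigitValue (c : Char) : Int :=
  let o : Int := c.toNat
  if 48 ≤ o ∧ o ≤ 57 then o - 48
  else if 97 ≤ o ∧ o ≤ 102 then o - 87
  else if 65 ≤ o ∧ o ≤ 70 then o - 55
  else 99

-- B's 'for c in num: if _digit_value(c) >= radix: return False' early-exit loop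
def pvCheckLoop (l : List Char) (radix : Int) : Bool :=
  match l with
  | [] => true
  | c :: rest => if pvDigitValue c ≥ radix then false else pvCheckLoop rest radix

def valid_number_for_radix_py_alt (num : String) (radix : Int) : Bool :=
  if radix ≠ 8 ∧ radix ≠ 10 ∧ radix ≠ 16 then
    false  -- raise SyntaxError("Unknown radix: %d" % radix): excluded by Pre_
  else
    pvCheckLoop num.toList radix

-- ===== PRECONDITION & SPEC =====
-- Pre_ excludes exactly the radices outside {8, 10, 16}, on which A raises SyntaxError.
def Pre_valid_number_for_radix_py (num : String) (radix : Int) : Prop :=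
  radix = 8 ∨ radix = 10 ∨ radix = 16
instance (num : String) (radix : Int) : Decidable (Pre_valid_number_for_radix_py num radix) := by
  unfold Pre_valid_number_for_radix_py; infer_instance
def pvWitness_valid_number_for_radix_py : String × Int := ("1a", 16)

def Spec_valid_number_for_radix_py (num : String) (radix : Int) (out : Bool) : Prop :=
  out = valid_number_for_radix_py_alt num radix
instance (num : String) (radix : Int) (out : Bool) : Decidable (Spec_valid_number_for_radix_py num radix out) := by
  unfold Spec_valid_number_for_radix_py; infer_instance

-- ===== CLAIM (what is proved, stated in full; the proofs are below) =====
def Claim_equal_valid_number_for_radix_py : Prop :=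
  ∀ (num : String) (radix : Int), Dom_valid_number_for_radix_py num radix →
    Pre_valid_number_for_radix_py num radix →
    Spec_valid_number_for_radix_py num radix (valid_number_for_radix_py num radix)

-- ===== LEMMAS AND PROOFS =====
theorem char_le_iff_toNat (a b : Char) : a ≤ b ↔ a.toNat ≤ b.toNat := Iff.rfl

-- B's early-exit loop is the conjunction of the per-character tests
theorem checkLoop_eq_all (l : List Char) (radix : Int) :
    pvCheckLoop l radix = l.all (fun c => decide (pvDigitValue c < radix)) := by
  induction l with
  | nil => rfl
  | cons c rest ih =>
    simp only [pvCheckLoop, List.all_cons, ih]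
    by_cases h : pvDigitValue c ≥ radix
    · simp [h, not_lt.mpr h]
    · simp [h, lt_of_not_ge h]

-- 'c in s' for a single character is membership in s's characters
theorem isIn_singleton (c : Char) (l : List Char) : PySem.Chars.isIn [c] l = l.contains c := by
  rw [Bool.eq_iff_iff, PySem.Chars.isIn_iff_infix, List.contains_iff_mem]
  constructor
  · intro h; exact h.mem (by simp)
  · intro h
    obtain ⟨s, t, rfl⟩ := List.append_of_mem h
    exact ⟨s, t, by simp⟩

-- per-character agreement, one lemma per radix
theorem char_oct (c : Char) :
    (decide ('0' ≤ c ∧ c ≤ '7')) = (decide (pvDigitValue c < 8)) := by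
  simp only [pvDigitValue, char_le_iff_toNat, Char.reduceToNat, decide_eq_decide]
  split_ifs <;> omega

theorem char_dec (c : Char) :
    (decide ('0' ≤ c ∧ c ≤ '9')) = (decide (pvDigitValue c < 10)) := by
  simp only [pvDigitValue, char_le_iff_toNat, Char.reduceToNat, decide_eq_decide]
  split_ifs <;> omega

theorem char_eq_iff_toNat (a b : Char) : a = b ↔ a.toNat = b.toNat :=
  ⟨fun h => h ▸ rfl, fun h => Char.ext (UInt32.toNat_inj.mp h)⟩

theorem char_hex (c : Char) :
    (['0','1','2','3','4','5','6','7','8','9','a','b','c','d','e','f','A','B','C','D','E','F'].contains c)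
      = (decide (pvDigitValue c < 16)) := by
  simp only [pvDigitValue, List.contains_eq_mem, decide_eq_decide, List.mem_cons,
    List.not_mem_nil, or_false, char_eq_iff_toNat, Char.reduceToNat]
  split_ifs <;> omega

-- ===== VERDICT (by name: the statement is the Claim_ definition above) =====
theorem valid_number_for_radix_py_spec : Claim_equal_valid_number_for_radix_py := by
  intro num radix _ hpre
  unfold Spec_valid_number_for_radix_py valid_number_for_radix_py valid_number_for_radix_py_alt
  rcases hpre with rfl | rfl | rfl
  · rw [if_pos rfl, if_neg (by omega), checkLoop_eq_all]
    exact congrArg _ (funext char_oct)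
  · rw [if_neg (by omega), if_pos rfl, if_neg (by omega), checkLoop_eq_all]
    exact congrArg _ (funext char_dec)
  · rw [if_neg (by omega), if_neg (by omega), if_pos rfl, if_neg (by omega), checkLoop_eq_all]
    refine congrArg _ (funext fun c => ?_)
    rw [isIn_singleton, char_hex]
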